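-- pv_equiv track=rewrite | github.com/Azizbekend/verge3d | max_plugin/utils.py | getParentNode
-- ===== SOURCE A (Python) =====
-- def getParentNode(gltf, nodeIndex):
--     if not gltf.get('nodes'):
--         return -1
--
--     index = 0
--
--     for node in gltf['nodes']:
--         if node.get('children'):
--             for childIndex in node['children']:
--                 if childIndex == nodeIndex:
--                     return index
--         index += 1
--
--     return -1
-- ===== SOURCE B (Python) =====
-- def getParentNode(gltf, nodeIndex):
--     parent_of = {}
--     for index, node in enumerate(gltf.get('nodes') or []):
--         for child in node.get('children') or []:
--             parent_of.setdefault(child, index)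
--     return parent_of.get(nodeIndex, -1)
-- ===== Notes on version B (the rewrite author's own statement) =====
-- stated objective: alternative
-- what changed: Replaces A's short-circuiting nested scan with one pass that builds a child->parent table via dict.setdefault (first parent wins) followed by a single dict lookup.
import Mathlib
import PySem

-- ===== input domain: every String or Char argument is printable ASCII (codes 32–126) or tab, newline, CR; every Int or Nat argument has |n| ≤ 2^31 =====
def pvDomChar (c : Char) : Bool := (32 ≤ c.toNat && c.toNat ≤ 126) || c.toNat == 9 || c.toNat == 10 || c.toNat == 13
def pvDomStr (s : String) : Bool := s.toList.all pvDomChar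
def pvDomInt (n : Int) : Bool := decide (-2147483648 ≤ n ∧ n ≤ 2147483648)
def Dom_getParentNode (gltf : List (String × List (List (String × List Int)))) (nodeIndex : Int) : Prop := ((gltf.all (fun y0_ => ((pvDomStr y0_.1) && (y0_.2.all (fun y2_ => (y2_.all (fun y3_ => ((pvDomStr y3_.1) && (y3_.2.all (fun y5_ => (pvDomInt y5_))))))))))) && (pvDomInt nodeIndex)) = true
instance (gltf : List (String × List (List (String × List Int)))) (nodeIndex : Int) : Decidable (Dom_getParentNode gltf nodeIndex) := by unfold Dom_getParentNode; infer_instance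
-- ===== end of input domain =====

-- B replaces A's short-circuiting nested scan by one pass building a child->parent
-- table with dict.setdefault (first parent wins) plus a single lookup (objective: alternative).

-- ===== PORT A =====
-- inner loop: 'for childIndex in node['children']: if childIndex == nodeIndex: return index'
def pvAFound (children : List Int) (nodeIndex : Int) : Bool :=
  match children with
  | [] => false
  | c :: rest => if c == nodeIndex then true else pvAFound rest nodeIndex

-- outer loop over nodes, carrying 'index'
def pvALoop (nodes : List (List (String × List Int))) (nodeIndex : Int) (index : Int) : Int :=
  match nodes with
  | [] => -1
  | node :: rest =>
    let ch := ((PySem.Dict.mk node).get? "children").getD []   -- node.get('children')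
    if ch ≠ [] then                                            -- truthy check
      if pvAFound ch nodeIndex then index
      else pvALoop rest nodeIndex (index + 1)
    else pvALoop rest nodeIndex (index + 1)

def getParentNode (gltf : List (String × List (List (String × List Int)))) (nodeIndex : Int) : Int :=
  let nodes := ((PySem.Dict.mk gltf).get? "nodes").getD []
  if nodes = [] then -1                                        -- 'if not gltf.get('nodes')'
  else pvALoop nodes nodeIndex 0

-- ===== PORT B =====
-- build parent_of: for index, node in enumerate(nodes): for child in node.get('children') or []: parent_of.setdefault(child, index)
def pvBuild (nodes : List (List (String × List Int))) : PySem.Dict Int Int :=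
  (PySem.List.enumerate nodes).foldl
    (fun d p =>
      (((PySem.Dict.mk p.2).get? "children").getD []).foldl
        (fun d c => d.setdefault c p.1) d)
    PySem.Dict.empty

def getParentNode_alt (gltf : List (String × List (List (String × List Int)))) (nodeIndex : Int) : Int :=
  (pvBuild (((PySem.Dict.mk gltf).get? "nodes").getD [])).getD nodeIndex (-1)

-- ===== PRECONDITION & SPEC =====
def Spec_getParentNode (gltf : List (String × List (List (String × List Int)))) (nodeIndex : Int) (out : Int) : Prop := out = getParentNode_alt gltf nodeIndex
instance (gltf : List (String × List (List (String × List Int)))) (nodeIndex : Int) (out : Int) : Decidable (Spec_getParentNode gltf nodeIndex out) := by unfold Spec_getParentNode; infer_instance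

-- ===== CLAIM (what is proved, stated in full; the proofs are below) =====
def Claim_equal_getParentNode : Prop := ∀ (gltf : List (String × List (List (String × List Int)))) (nodeIndex : Int), Dom_getParentNode gltf nodeIndex → Spec_getParentNode gltf nodeIndex (getParentNode gltf nodeIndex)

-- ===== LEMMAS AND PROOFS =====

-- folding setdefault over a children list: looked-up value changes only if the key occurs
theorem pv_fold_setdefault_get? (ch : List Int) (d : PySem.Dict Int Int) (s k : Int) :
    (ch.foldl (fun d c => d.setdefault c s) d).get? k
      = if pvAFound ch k then some ((d.get? k).getD s) else d.get? k := by
  induction ch generalizing d with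
  | nil => simp [pvAFound]
  | cons c rest ih =>
    simp only [List.foldl_cons]
    rw [ih]
    by_cases hck : c = k
    · subst hck
      simp [pvAFound, PySem.Dict.get?_setdefault_self]
    · have hne : k ≠ c := fun h => hck h.symm
      rw [PySem.Dict.get?_setdefault_of_ne d s hne]
      simp [pvAFound, hck]

-- main invariant: the lookup in the table built from 'd' onwards equals d's entry if present,
-- otherwise A's scan starting at index s
theorem pv_key (nodes : List (List (String × List Int))) (k : Int) :
    ∀ (s : Int) (d : PySem.Dict Int Int),
      ((PySem.List.enumerate nodes s).foldl
        (fun d p =>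
          (((PySem.Dict.mk p.2).get? "children").getD []).foldl
            (fun d c => d.setdefault c p.1) d) d).getD k (-1)
        = match d.get? k with
          | some v => v
          | none => pvALoop nodes k s := by
  induction nodes with
  | nil =>
    intro s d
    simp [PySem.List.enumerate_nil, pvALoop, PySem.Dict.getD]
    cases d.get? k <;> simp
  | cons node rest ih =>
    intro s d
    rw [PySem.List.enumerate_cons, List.foldl_cons]
    rw [ih]
    rw [pv_fold_setdefault_get?]
    cases hd : d.get? k with
    | some v =>
      simp only [Option.getD_some, ite_self]
    | none =>
      simp only [Option.getD_none]
      by_cases hf : pvAFound (((PySem.Dict.mk node).get? "children").getD []) k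
      · have hne : (((PySem.Dict.mk node).get? "children").getD []) ≠ [] := by
          intro h; rw [h] at hf; simp [pvAFound] at hf
        simp [hf, pvALoop, hne]
      · simp only [hf, if_neg, Bool.false_eq_true, not_false_eq_true]
        simp only [pvALoop]
        split <;> rfl

-- ===== VERDICT (by name: the statement is the Claim_ definition above) =====
theorem getParentNode_spec : Claim_equal_getParentNode := by
  intro gltf nodeIndex _
  unfold Spec_getParentNode getParentNode getParentNode_alt pvBuild
  rw [pv_key]
  simp only [PySem.Dict.get?_empty]
  by_cases h : (((PySem.Dict.mk gltf).get? "nodes").getD []) = []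
  · simp [h, pvALoop]
  · simp [h]
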